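-- pv_equiv track=rewrite | github.com/gcomneno/pet | tools/pet_family_combinations.py | unique_cross_pairs
-- ===== SOURCE A (Python) =====
-- from itertools import combinations, product
-- from typing import Iterable, List, Tuple
--
-- def unique_cross_pairs(left: Iterable[int], right: Iterable[int]) -> List[Tuple[int, int]]:
--     seen = set()
--     pairs: List[Tuple[int, int]] = []
--     for a, b in product(left, right):
--         if a == b:
--             continue
--         pair = (a, b) if a < b else (b, a)
--         if pair not in seen:
--             seen.add(pair)
--             pairs.append(pair)
--     pairs.sort()
--     return pairs
-- ===== SOURCE B (Python) =====
-- def unique_cross_pairs(left, right):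
--     right = list(right)
--     flat = [(a, b) if a < b else (b, a)
--             for a in left for b in right if a != b]
--     flat.sort()
--     out = []
--     for p in flat:
--         if not out or out[-1] != p:
--             out.append(p)
--     return out
-- ===== Notes on version B (the rewrite author's own statement) =====
-- stated objective: alternative
-- what changed: B replaces A's set-based dedup-during-iteration-then-sort with a flat comprehension of all normalized pairs, a sort, and a single adjacency pass that drops equal neighbours.
import Mathlib
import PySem

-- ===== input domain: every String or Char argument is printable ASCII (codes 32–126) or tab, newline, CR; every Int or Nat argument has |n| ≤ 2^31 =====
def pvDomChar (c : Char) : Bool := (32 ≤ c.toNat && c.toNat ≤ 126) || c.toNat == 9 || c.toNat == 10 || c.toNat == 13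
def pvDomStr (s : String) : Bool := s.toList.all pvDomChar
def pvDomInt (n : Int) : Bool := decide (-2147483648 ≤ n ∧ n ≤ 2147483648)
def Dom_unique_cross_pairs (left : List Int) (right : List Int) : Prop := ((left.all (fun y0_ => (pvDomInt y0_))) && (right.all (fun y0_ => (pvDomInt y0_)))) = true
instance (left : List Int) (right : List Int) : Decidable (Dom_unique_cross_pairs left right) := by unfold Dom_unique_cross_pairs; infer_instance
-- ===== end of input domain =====

-- B builds all normalized cross pairs, sorts, and deduplicates by one adjacency pass
-- instead of A's set-guarded dedup during iteration followed by a sort (alternative algorithm, same result).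


-- ===== PORT A =====
-- for a, b in product(left, right): skip a == b, normalize, set-guarded append; then pairs.sort()
-- (Python sorts tuples lexicographically: sorted2 with fst/snd keys is exactly list.sort() on pairs)
def unique_cross_pairs (left : List Int) (right : List Int) : List (Int × Int) :=
  let st := left.foldl (fun st a =>
    right.foldl (fun st b =>
      if a == b then st
      else
        let pair := if a < b then (a, b) else (b, a)
        if PySem.Set.contains st.1 pair then st
        else (PySem.Set.add st.1 pair, st.2 ++ [pair])) st) (PySem.Set.empty, [])
  PySem.List.sorted2 st.2 Prod.fst Prod.snd

-- ===== PORT B =====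
-- flat comprehension of normalized pairs, flat.sort(), then one adjacency-dedup pass
-- (out[-1] on the nonempty out is List.getLast?)
def unique_cross_pairs_alt (left : List Int) (right : List Int) : List (Int × Int) :=
  let flat := left.flatMap (fun a =>
    (right.filter (fun b => a ≠ b)).map (fun b => if a < b then (a, b) else (b, a)))
  let s := PySem.List.sorted2 flat Prod.fst Prod.snd
  s.foldl (fun out p => if out = [] ∨ out.getLast? ≠ some p then out ++ [p] else out) []

-- ===== PRECONDITION & SPEC =====
def Spec_unique_cross_pairs (left : List Int) (right : List Int) (out : List (Int × Int)) : Prop := out = unique_cross_pairs_alt left right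
instance (left : List Int) (right : List Int) (out : List (Int × Int)) : Decidable (Spec_unique_cross_pairs left right out) := by unfold Spec_unique_cross_pairs; infer_instance

-- ===== CLAIM (what is proved, stated in full; the proofs are below) =====
def Claim_equal_unique_cross_pairs : Prop := ∀ (left : List Int) (right : List Int), Dom_unique_cross_pairs left right → Spec_unique_cross_pairs left right (unique_cross_pairs left right)

-- ===== LEMMAS AND PROOFS =====

-- the normalized-pair stream both programs walk, in the same order
def pvStream (left right : List Int) : List (Int × Int) :=
  left.flatMap (fun a =>
    (right.filter (fun b => a ≠ b)).map (fun b => if a < b then (a, b) else (b, a)))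

-- adjacency dedup, structurally (the shape B's foldl computes)
def pvAdjFrom (prev : Int × Int) : List (Int × Int) → List (Int × Int)
  | [] => []
  | y :: t => if y = prev then pvAdjFrom prev t else y :: pvAdjFrom y t

def pvAdj : List (Int × Int) → List (Int × Int)
  | [] => []
  | x :: t => x :: pvAdjFrom x t

-- B's fold is pvAdj
theorem pvFoldl_adjFrom (s : List (Int × Int)) :
    ∀ (acc : List (Int × Int)) (v : Int × Int), acc.getLast? = some v →
    s.foldl (fun out p => if out = [] ∨ out.getLast? ≠ some p then out ++ [p] else out) acc
      = acc ++ pvAdjFrom v s := by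
  induction s with
  | nil => intro acc v _; simp [pvAdjFrom]
  | cons y t ih =>
    intro acc v hv
    have hne : acc ≠ [] := by intro h; simp [h] at hv
    simp only [List.foldl_cons]
    by_cases hyd : y = v
    · subst hyd
      rw [pvAdjFrom, if_pos rfl]
      split_ifs with h
      · rcases h with h | h
        · exact absurd h hne
        · exact absurd hv h
      · exact ih acc y hv
    · have hl : acc.getLast? ≠ some y := by
        rw [hv]; intro h; exact hyd (Option.some.inj h).symm
      rw [pvAdjFrom, if_neg hyd]
      split_ifs with h
      · rw [ih (acc ++ [y]) y (by simp)]; simp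
      · exact absurd (Or.inr hl) h

theorem pvFoldl_adj (s : List (Int × Int)) :
    s.foldl (fun out p => if out = [] ∨ out.getLast? ≠ some p then out ++ [p] else out) []
      = pvAdj s := by
  cases s with
  | nil => rfl
  | cons x t =>
    simp only [List.foldl_cons, pvAdj, List.nil_append]
    rw [if_pos (Or.inl trivial)]
    exact pvFoldl_adjFrom t [x] x rfl

-- sorted2 with fst/snd keys is sorting by the lexicographic order on pairs
theorem pvSorted2_eq_sorted_toLex (xs : List (Int × Int)) :
    PySem.List.sorted2 xs Prod.fst Prod.snd
      = PySem.List.sorted xs (fun p => (toLex p : Lex (Int × Int))) := by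
  rw [PySem.List.sorted_eq_foldl_insertBy]
  unfold PySem.List.sorted2
  show List.foldl (fun acc x => PySem.List.insertBy
      (fun a b => decide (a.1 < b.1) || (!decide (b.1 < a.1) && decide (a.2 < b.2))) x acc) [] xs = _
  congr 1
  funext acc x
  congr 1
  funext a b
  have hli : ((toLex a : Lex (Int × Int)) < toLex b) ↔ (a.1 < b.1 ∨ a.1 = b.1 ∧ a.2 < b.2) :=
    Prod.Lex.lt_iff
  by_cases h1 : a.1 < b.1
  · simp [hli, h1]
  · by_cases h2 : b.1 < a.1
    · simp [hli, h2, h1, (show ¬ a.1 = b.1 by omega)]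
    · have he : a.1 = b.1 := le_antisymm (not_lt.mp h2) (not_lt.mp h1)
      by_cases h3 : a.2 < b.2 <;> simp [hli, he, h3]

-- pvAdjFrom on a ≤-sorted tail: membership, strict pairwise, strict above prev
theorem pvAdjFrom_spec (s : List (Int × Int)) :
    ∀ prev : Int × Int,
    s.Pairwise (fun p q => (toLex p : Lex (Int × Int)) ≤ toLex q) →
    (∀ y ∈ s, (toLex prev : Lex (Int × Int)) ≤ toLex y) →
    (∀ x, x ∈ pvAdjFrom prev s ↔ x ∈ s ∧ x ≠ prev) ∧
    (pvAdjFrom prev s).Pairwise (fun p q => (toLex p : Lex (Int × Int)) < toLex q) ∧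
    (∀ y ∈ pvAdjFrom prev s, (toLex prev : Lex (Int × Int)) < toLex y) := by
  induction s with
  | nil => intro prev _ _; simp [pvAdjFrom]
  | cons y t ih =>
    intro prev hp hub
    have hpt : t.Pairwise (fun p q => (toLex p : Lex (Int × Int)) ≤ toLex q) := hp.of_cons
    have hyt : ∀ z ∈ t, (toLex y : Lex (Int × Int)) ≤ toLex z :=
      fun z hz => List.rel_of_pairwise_cons hp hz
    by_cases hyd : y = prev
    · subst hyd
      have hred : pvAdjFrom y (y :: t) = pvAdjFrom y t := by rw [pvAdjFrom, if_pos rfl]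
      rw [hred]
      obtain ⟨hm, hpw, hab⟩ := ih y hpt hyt
      refine ⟨fun x => ?_, hpw, hab⟩
      rw [hm]
      constructor
      · rintro ⟨hx, hne⟩; exact ⟨List.mem_cons_of_mem _ hx, hne⟩
      · rintro ⟨hx, hne⟩
        rcases List.mem_cons.mp hx with h | h
        · exact absurd h hne
        · exact ⟨h, hne⟩
    · have hred : pvAdjFrom prev (y :: t) = y :: pvAdjFrom y t := by rw [pvAdjFrom, if_neg hyd]
      rw [hred]
      obtain ⟨hm, hpw, hab⟩ := ih y hpt hyt
      have hpy : (toLex prev : Lex (Int × Int)) < toLex y := by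
        rcases lt_or_eq_of_le (hub y (List.mem_cons_self ..)) with h | h
        · exact h
        · exact absurd (toLex.injective h).symm hyd
      refine ⟨fun x => ?_, ?_, ?_⟩
      · constructor
        · intro hx
          rcases List.mem_cons.mp hx with rfl | hx'
          · exact ⟨List.mem_cons_self .., hyd⟩
          · obtain ⟨hxt, hxy⟩ := (hm x).mp hx'
            refine ⟨List.mem_cons_of_mem _ hxt, ?_⟩
            intro h; subst h
            exact absurd (lt_of_lt_of_le hpy (hyt x hxt)) (lt_irrefl _)
        · rintro ⟨hx, hxp⟩
          rcases List.mem_cons.mp hx with rfl | hxt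
          · exact List.mem_cons_self ..
          · by_cases hxy : x = y
            · subst hxy; exact List.mem_cons_self ..
            · exact List.mem_cons_of_mem _ ((hm x).mpr ⟨hxt, hxy⟩)
      · exact List.pairwise_cons.mpr ⟨fun z hz => hab z hz, hpw⟩
      · intro z hz
        rcases List.mem_cons.mp hz with rfl | hz'
        · exact hpy
        · exact lt_trans hpy (hab z hz')

theorem pvAdj_spec (s : List (Int × Int))
    (hp : s.Pairwise (fun p q => (toLex p : Lex (Int × Int)) ≤ toLex q)) :
    (∀ x, x ∈ pvAdj s ↔ x ∈ s) ∧
    (pvAdj s).Pairwise (fun p q => (toLex p : Lex (Int × Int)) < toLex q) := by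
  cases s with
  | nil => simp [pvAdj]
  | cons x t =>
    obtain ⟨hm, hpw, hab⟩ :=
      pvAdjFrom_spec t x hp.of_cons (fun z hz => List.rel_of_pairwise_cons hp hz)
    simp only [pvAdj]
    constructor
    · intro z
      simp only [List.mem_cons, hm]
      constructor
      · rintro (rfl | ⟨h, _⟩)
        · exact Or.inl rfl
        · exact Or.inr h
      · rintro (rfl | h)
        · exact Or.inl rfl
        · by_cases hz : z = x
          · exact Or.inl hz
          · exact Or.inr ⟨h, hz⟩
    · exact List.pairwise_cons.mpr ⟨fun z hz => hab z hz, hpw⟩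

-- the heart: sorting the dedup equals adjacency-dedup of the sort
theorem pvSortedDedup (l : List (Int × Int)) :
    PySem.List.sorted (PySem.List.dedup l) (fun p => (toLex p : Lex (Int × Int)))
      = pvAdj (PySem.List.sorted l (fun p => (toLex p : Lex (Int × Int)))) := by
  have hsp : (PySem.List.sorted l (fun p => (toLex p : Lex (Int × Int)))).Pairwise
      (fun p q => (toLex p : Lex (Int × Int)) ≤ toLex q) :=
    PySem.List.sorted_pairwise l _
  obtain ⟨hm, hpw⟩ := pvAdj_spec _ hsp
  apply PySem.List.sorted_eq_of_perm_of_pairwise_lt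
  · have hnd1 : (pvAdj (PySem.List.sorted l (fun p => (toLex p : Lex (Int × Int))))).Nodup :=
      hpw.imp (fun h => fun he => (ne_of_lt h) (congrArg toLex he))
    have hnd2 : (PySem.List.dedup l).Nodup := PySem.List.nodup_dedup l
    refine (List.perm_ext_iff_of_nodup hnd1 hnd2).mpr ?_
    intro x
    rw [hm x, PySem.List.mem_sorted, PySem.List.mem_dedup]
  · exact hpw

-- A's inner loop over right: Set.update of the normalized pairs of one a, in both components
theorem pvInner (rs : List Int) (a : Int) :
    ∀ S : List (Int × Int),
    rs.foldl (fun st b =>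
      if a == b then st
      else
        if PySem.Set.contains st.1 (if a < b then (a, b) else (b, a)) then st
        else (PySem.Set.add st.1 (if a < b then (a, b) else (b, a)),
              st.2 ++ [if a < b then (a, b) else (b, a)])) (S, S)
      = (PySem.Set.update S ((rs.filter (fun b => a ≠ b)).map (fun b => if a < b then (a, b) else (b, a))),
         PySem.Set.update S ((rs.filter (fun b => a ≠ b)).map (fun b => if a < b then (a, b) else (b, a)))) := by
  induction rs with
  | nil => intro S; simp [PySem.Set.update]
  | cons b t ih =>
    intro S
    simp only [List.foldl_cons]
    have hu : ∀ (T : List (Int × Int)) (x : Int × Int) (xs : List (Int × Int)),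
        PySem.Set.update T (x :: xs) = PySem.Set.update (PySem.Set.add T x) xs := fun _ _ _ => rfl
    by_cases hab : a = b
    · rw [if_pos (by simp [hab] : (a == b) = true), ih S]
      simp [hab]
    · rw [if_neg (by simp [hab] : ¬ ((a == b) = true))]
      have hs : (b :: t).filter (fun b => decide (a ≠ b)) = b :: t.filter (fun b => decide (a ≠ b)) := by
        simp [hab]
      by_cases hc : PySem.Set.contains S (if a < b then (a, b) else (b, a)) = true
      · rw [if_pos hc, hs, List.map_cons, hu]
        have hm : (if a < b then (a, b) else (b, a)) ∈ S := by
          simpa [PySem.Set.contains] using hc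
        have hadd : PySem.Set.add S (if a < b then (a, b) else (b, a)) = S := by
          simp [PySem.Set.add, PySem.Set.contains, hm]
        rw [hadd]
        exact ih S
      · rw [if_neg hc, hs, List.map_cons, hu]
        have hadd : PySem.Set.add S (if a < b then (a, b) else (b, a))
            = S ++ [if a < b then (a, b) else (b, a)] := by
          have hm : (if a < b then (a, b) else (b, a)) ∉ S := by
            simpa [PySem.Set.contains] using hc
          simp [PySem.Set.add, PySem.Set.contains, hm]
        rw [hadd]
        exact ih (S ++ [if a < b then (a, b) else (b, a)])

-- A's full double loop: Set.update of the whole stream, in both components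
theorem pvOuter (ls rs : List Int) :
    ∀ S : List (Int × Int),
    ls.foldl (fun st a =>
      rs.foldl (fun st b =>
        if a == b then st
        else
          if PySem.Set.contains st.1 (if a < b then (a, b) else (b, a)) then st
          else (PySem.Set.add st.1 (if a < b then (a, b) else (b, a)),
                st.2 ++ [if a < b then (a, b) else (b, a)])) st) (S, S)
      = (PySem.Set.update S (pvStream ls rs), PySem.Set.update S (pvStream ls rs)) := by
  induction ls with
  | nil => intro S; simp [pvStream, PySem.Set.update]
  | cons a t ih =>
    intro S
    simp only [List.foldl_cons]
    rw [pvInner rs a S, ih]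
    have : pvStream (a :: t) rs
        = ((rs.filter (fun b => a ≠ b)).map (fun b => if a < b then (a, b) else (b, a)))
          ++ pvStream t rs := by
      simp [pvStream]
    rw [this]
    simp [PySem.Set.update, List.foldl_append]

-- A as sorted2-of-dedup of the stream
theorem pvA_eq (left right : List Int) :
    unique_cross_pairs left right
      = PySem.List.sorted2 (PySem.List.dedup (pvStream left right)) Prod.fst Prod.snd := by
  show PySem.List.sorted2
      (left.foldl (fun st a =>
        right.foldl (fun st b =>
          if a == b then st
          else
            if PySem.Set.contains st.1 (if a < b then (a, b) else (b, a)) then st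
            else (PySem.Set.add st.1 (if a < b then (a, b) else (b, a)),
                  st.2 ++ [if a < b then (a, b) else (b, a)])) st)
        (([] : List (Int × Int)), ([] : List (Int × Int)))).2 Prod.fst Prod.snd = _
  rw [pvOuter left right []]
  have : PySem.Set.update ([] : List (Int × Int)) (pvStream left right)
      = PySem.List.dedup (pvStream left right) := by
    rw [PySem.List.dedup_eq_ofList, PySem.Set.ofList_eq_foldl]
    rfl
  rw [this]

-- ===== VERDICT (by name: the statement is the Claim_ definition above) =====
theorem unique_cross_pairs_spec : Claim_equal_unique_cross_pairs := by
  intro left right _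
  unfold Spec_unique_cross_pairs unique_cross_pairs_alt
  rw [pvA_eq, show (left.flatMap (fun a =>
      (right.filter (fun b => a ≠ b)).map (fun b => if a < b then (a, b) else (b, a))))
      = pvStream left right from rfl,
    pvFoldl_adj, pvSorted2_eq_sorted_toLex, pvSorted2_eq_sorted_toLex]
  exact pvSortedDedup (pvStream left right)
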